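-- pv_equiv track=rewrite | github.com/TowerChair/Proyecto2 | QMC1.py | agregar_pesos
-- ===== SOURCE A (Python) =====
-- def verificar_potencia(num1,num2):
-- 	difer=abs(num1-num2)
-- 	if (difer==1 or difer==2 or difer==4 or difer==8 or difer==16 or difer==32 or difer==64 or difer==128 or difer==256 or difer==512 or difer==1024 or difer==2048 or difer==4096) :
-- 		return difer
-- 	else:
-- 		return 0
--
-- def eliminar_repetidos(lis):
-- 	temporal=[]
-- 	for i in range(0,len(lis)):
-- 		cont=0
-- 		for j in range(0,len(temporal)):
-- 			if temporal[j]==lis[i]: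
-- 				cont=cont+1
-- 		if cont==0:
-- 			temporal.append(lis[i])
-- 	return temporal
--
-- def agregar_pesos(terminos):
-- 	lista_vac=[]
-- 	for i in range(0,len(terminos)):
-- 		for j in range(len(terminos)):
-- 			if verificar_potencia(terminos[i],terminos[j])!=0:
-- 				lista_vac.append(verificar_potencia(terminos[i],terminos[j]))
-- 	lista_vac.sort()
-- 	lista_vac=eliminar_repetidos(lista_vac)
-- 	return lista_vac
-- ===== SOURCE B (Python) =====
-- POWERS = (1, 2, 4, 8, 16, 32, 64, 128, 256, 512, 1024, 2048, 4096)
--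
-- def agregar_pesos(terminos):
--     s = set(terminos)
--     return [p for p in POWERS if any(t + p in s for t in s)]
-- ===== Notes on version B (the rewrite author's own statement) =====
-- stated objective: faster
-- what changed: Instead of scanning all O(n^2) term pairs, collecting matching differences, sorting and deduplicating them, B builds a hash set of the terms once and, for each of the 13 candidate powers of two in ascending order, tests whether some term t has t+p also present; the output list is produced already sorted and distinct.
import Mathlib
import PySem

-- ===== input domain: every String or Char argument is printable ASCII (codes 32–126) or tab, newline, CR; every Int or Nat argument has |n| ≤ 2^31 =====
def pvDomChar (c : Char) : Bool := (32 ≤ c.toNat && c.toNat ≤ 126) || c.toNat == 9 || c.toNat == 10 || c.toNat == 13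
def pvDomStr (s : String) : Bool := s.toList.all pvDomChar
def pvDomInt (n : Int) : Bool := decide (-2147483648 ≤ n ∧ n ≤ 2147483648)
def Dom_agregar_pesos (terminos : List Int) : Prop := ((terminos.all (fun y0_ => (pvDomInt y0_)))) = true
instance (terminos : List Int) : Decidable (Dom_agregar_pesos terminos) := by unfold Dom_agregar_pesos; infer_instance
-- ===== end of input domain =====

-- B replaces A's O(n^2) all-pairs difference scan + sort + dedup by a single hash-set of the
-- terms queried once per candidate power of two (objective: faster, asymptotic).

-- ===== PORT A =====
def verificar_potencia (num1 num2 : Int) : Int :=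
  let difer := |num1 - num2|
  if difer = 1 ∨ difer = 2 ∨ difer = 4 ∨ difer = 8 ∨ difer = 16 ∨ difer = 32 ∨ difer = 64 ∨
     difer = 128 ∨ difer = 256 ∨ difer = 512 ∨ difer = 1024 ∨ difer = 2048 ∨ difer = 4096 then
    difer
  else
    0

def eliminar_repetidos (lis : List Int) : List Int :=
  lis.foldl (fun temporal x =>
    let cont := temporal.foldl (fun c y => if y = x then c + 1 else c) (0 : Int)
    if cont = 0 then temporal ++ [x] else temporal) []

def agregar_pesos (terminos : List Int) : List Int :=
  let lista_vac := terminos.foldl (fun acc ti =>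
    terminos.foldl (fun acc2 tj =>
      if verificar_potencia ti tj ≠ 0 then acc2 ++ [verificar_potencia ti tj] else acc2) acc) []
  eliminar_repetidos (PySem.List.sorted lista_vac (fun x => x) false)

-- ===== PORT B =====
def pvPOWERS : List Int := [1, 2, 4, 8, 16, 32, 64, 128, 256, 512, 1024, 2048, 4096]

def agregar_pesos_alt (terminos : List Int) : List Int :=
  let s : PySem.Set Int := PySem.Set.ofList terminos
  pvPOWERS.filter (fun p => s.any (fun t => PySem.Set.contains s (t + p)))

-- ===== PRECONDITION & SPEC =====
def Spec_agregar_pesos (terminos : List Int) (out : List Int) : Prop := out = agregar_pesos_alt terminos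
instance (terminos : List Int) (out : List Int) : Decidable (Spec_agregar_pesos terminos out) := by unfold Spec_agregar_pesos; infer_instance

-- ===== CLAIM (what is proved, stated in full; the proofs are below) =====
def Claim_equal_agregar_pesos : Prop := ∀ (terminos : List Int), Dom_agregar_pesos terminos → Spec_agregar_pesos terminos (agregar_pesos terminos)

-- ===== LEMMAS AND PROOFS =====

-- verificar_potencia characterised by membership in the powers list
theorem verificar_potencia_eq (a b : Int) :
    verificar_potencia a b = if |a - b| ∈ pvPOWERS then |a - b| else 0 := by
  simp only [verificar_potencia, pvPOWERS, List.mem_cons, List.not_mem_nil, or_false]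

-- the inner counting loop of A's dedup helper computes the count
theorem cnt_eq (x : Int) (acc : List Int) (c : Int) :
    acc.foldl (fun c y => if y = x then c + 1 else c) c = c + (acc.count x : Int) := by
  induction acc generalizing c with
  | nil => simp
  | cons a t ih =>
    rw [List.foldl_cons]
    by_cases h : a = x
    · rw [if_pos h, ih, List.count_cons, if_pos (by simp [h])]
      push_cast; ring
    · rw [if_neg h, ih, List.count_cons, if_neg (by simp [h])]
      simp

-- one step of eliminar_repetidos is a conditional append
theorem er_step (acc : List Int) (x : Int) :
    (fun temporal x =>
      let cont := temporal.foldl (fun c y => if y = x then c + 1 else c) (0 : Int)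
      if cont = 0 then temporal ++ [x] else temporal) acc x
    = if x ∈ acc then acc else acc ++ [x] := by
  simp only [cnt_eq, zero_add]
  by_cases h : x ∈ acc
  · rw [if_neg (by simpa [List.count_eq_zero] using h), if_pos h]
  · rw [if_pos (by simpa [List.count_eq_zero] using h), if_neg h]

-- the whole fold, with the clean step
theorem er_fold_eq (l acc : List Int) :
    l.foldl (fun temporal x =>
      let cont := temporal.foldl (fun c y => if y = x then c + 1 else c) (0 : Int)
      if cont = 0 then temporal ++ [x] else temporal) acc
    = l.foldl (fun temporal x => if x ∈ temporal then temporal else temporal ++ [x]) acc :=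
  PySem.List.foldl_congr_mem l _ _ acc (fun a x _ => er_step a x)

theorem er_go_mem (l acc : List Int) (x : Int) :
    x ∈ l.foldl (fun temporal x => if x ∈ temporal then temporal else temporal ++ [x]) acc
    ↔ x ∈ acc ∨ x ∈ l := by
  induction l generalizing acc with
  | nil => simp
  | cons a t ih =>
    rw [List.foldl_cons]
    split_ifs with h
    · rw [ih]
      simp only [List.mem_cons]
      constructor
      · rintro (hx | hx)
        · exact Or.inl hx
        · exact Or.inr (Or.inr hx)
      · rintro (hx | hx | hx)
        · exact Or.inl hx
        · exact Or.inl (hx ▸ h)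
        · exact Or.inr hx
    · rw [ih]
      simp only [List.mem_append, List.mem_cons]
      tauto

theorem er_go_nodup (l acc : List Int) (h : acc.Nodup) :
    (l.foldl (fun temporal x => if x ∈ temporal then temporal else temporal ++ [x]) acc).Nodup := by
  induction l generalizing acc with
  | nil => exact h
  | cons a t ih =>
    rw [List.foldl_cons]
    split_ifs with ha
    · exact ih _ h
    · refine ih _ ?_
      rw [List.nodup_append]
      exact ⟨h, List.nodup_singleton a, by intro b hb c hc hbc; rw [List.mem_singleton] at hc; exact ha ((hbc.trans hc) ▸ hb)⟩

theorem er_go_sublist (l acc : List Int) :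
    (l.foldl (fun temporal x => if x ∈ temporal then temporal else temporal ++ [x]) acc).Sublist
      (acc ++ l) := by
  induction l generalizing acc with
  | nil => simp
  | cons a t ih =>
    rw [List.foldl_cons]
    split_ifs with ha
    · exact (ih acc).trans ((List.append_sublist_append_left acc).mpr (t.sublist_cons_self a))
    · simpa using ih (acc ++ [a])

theorem eliminar_repetidos_mem (l : List Int) (x : Int) :
    x ∈ eliminar_repetidos l ↔ x ∈ l := by
  unfold eliminar_repetidos
  rw [er_fold_eq, er_go_mem]
  simp

theorem eliminar_repetidos_nodup (l : List Int) : (eliminar_repetidos l).Nodup := by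
  unfold eliminar_repetidos
  rw [er_fold_eq]
  exact er_go_nodup _ _ List.nodup_nil

theorem eliminar_repetidos_sublist (l : List Int) : (eliminar_repetidos l).Sublist l := by
  unfold eliminar_repetidos
  rw [er_fold_eq]
  simpa using er_go_sublist l []

-- the multiset A collects: closed form of the double loop
theorem lista_vac_eq (terminos : List Int) :
    terminos.foldl (fun acc ti =>
      terminos.foldl (fun acc2 tj =>
        if verificar_potencia ti tj ≠ 0 then acc2 ++ [verificar_potencia ti tj] else acc2) acc) []
    = terminos.flatMap (fun ti =>
        (terminos.filter (fun tj => decide (verificar_potencia ti tj ≠ 0))).map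
          (fun tj => verificar_potencia ti tj)) := by
  rw [PySem.List.foldl_congr_mem
      (g := fun acc ti => acc ++ (terminos.filter (fun tj => decide (verificar_potencia ti tj ≠ 0))).map
          (fun tj => verificar_potencia ti tj))]
  · rw [PySem.List.foldl_append_eq_flatMap]; simp
  · intro acc ti _
    exact PySem.List.foldl_append_ite (p := fun tj => verificar_potencia ti tj ≠ 0)
      (f := fun tj => verificar_potencia ti tj) (l := terminos) (acc := acc)

-- membership in the collected multiset
theorem mem_lista_vac (terminos : List Int) (x : Int) :
    (x ∈ terminos.flatMap (fun ti =>
        (terminos.filter (fun tj => decide (verificar_potencia ti tj ≠ 0))).map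
          (fun tj => verificar_potencia ti tj)))
    ↔ (x ∈ pvPOWERS ∧ ∃ ti ∈ terminos, ∃ tj ∈ terminos, |ti - tj| = x) := by
  simp only [List.mem_flatMap, List.mem_map, List.mem_filter, decide_eq_true_eq]
  constructor
  · rintro ⟨ti, hti, tj, ⟨htj, hne⟩, hv⟩
    rw [verificar_potencia_eq] at hv hne
    by_cases hm : |ti - tj| ∈ pvPOWERS
    · rw [if_pos hm] at hv
      exact ⟨hv ▸ hm, ti, hti, tj, htj, hv⟩
    · rw [if_neg hm] at hne; exact absurd rfl hne
  · rintro ⟨hp, ti, hti, tj, htj, habs⟩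
    refine ⟨ti, hti, tj, ⟨htj, ?_⟩, ?_⟩ <;> rw [verificar_potencia_eq, habs, if_pos (habs ▸ hp)]
    · intro h0; rw [h0] at hp; revert hp; decide
  -- powers are nonzero, so the guard fires exactly on membership

-- B's filter predicate, as an existential over pairs
theorem alt_pred_iff (terminos : List Int) (p : Int) (hp : (0:Int) < p) :
    ((PySem.Set.ofList terminos).any (fun t => PySem.Set.contains (PySem.Set.ofList terminos) (t + p)) = true)
    ↔ (∃ ti ∈ terminos, ∃ tj ∈ terminos, |ti - tj| = p) := by
  simp only [List.any_eq_true, PySem.Set.contains_eq_listContains, List.contains_iff_mem,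
    PySem.Set.mem_ofList]
  constructor
  · rintro ⟨t, ht, htp⟩
    exact ⟨t + p, htp, t, ht, by rw [abs_of_pos]; omega; omega⟩
  · rintro ⟨ti, hti, tj, htj, habs⟩
    rcases abs_cases (ti - tj) with ⟨he, _⟩ | ⟨he, _⟩
    · exact ⟨tj, htj, by rw [show tj + p = ti by omega]; exact hti⟩
    · exact ⟨ti, hti, by rw [show ti + p = tj by omega]; exact htj⟩

theorem pvPOWERS_pos : ∀ p ∈ pvPOWERS, (0:Int) < p := by decide

theorem pvPOWERS_pairwise : pvPOWERS.Pairwise (· < ·) := by decide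

-- both results are strictly increasing with the same members, hence equal
theorem agregar_pesos_eq_alt (terminos : List Int) :
    agregar_pesos terminos = agregar_pesos_alt terminos := by
  unfold agregar_pesos agregar_pesos_alt
  simp only []
  set L := terminos.foldl (fun acc ti =>
    terminos.foldl (fun acc2 tj =>
      if verificar_potencia ti tj ≠ 0 then acc2 ++ [verificar_potencia ti tj] else acc2) acc) [] with hL
  set A := eliminar_repetidos (PySem.List.sorted L (fun x => x) false) with hA
  set B := pvPOWERS.filter
    (fun p => (PySem.Set.ofList terminos).any
      (fun t => PySem.Set.contains (PySem.Set.ofList terminos) (t + p))) with hB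
  -- common membership description
  have hmem : ∀ x, x ∈ A ↔ x ∈ B := by
    intro x
    rw [hA, eliminar_repetidos_mem, PySem.List.mem_sorted, hL, lista_vac_eq, mem_lista_vac,
      hB, List.mem_filter]
    constructor
    · rintro ⟨hpx, hex⟩
      exact ⟨hpx, (alt_pred_iff terminos x (pvPOWERS_pos x hpx)).mpr hex⟩
    · rintro ⟨hpx, hpred⟩
      exact ⟨hpx, (alt_pred_iff terminos x (pvPOWERS_pos x hpx)).mp hpred⟩
  -- A is strictly increasing
  have hAsorted : A.Pairwise (· < ·) := by
    have hle : A.Pairwise (· ≤ ·) := by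
      have hs : (PySem.List.sorted L (fun x => x) false).Pairwise (· ≤ ·) := by
        simpa using PySem.List.sorted_pairwise (xs := L) (key := fun x : Int => x)
      exact hs.sublist (eliminar_repetidos_sublist _)
    have hne : A.Pairwise (· ≠ ·) := eliminar_repetidos_nodup _
    exact (hle.and hne).imp (fun h => lt_of_le_of_ne h.1 h.2)
  -- B is strictly increasing
  have hBsorted : B.Pairwise (· < ·) := pvPOWERS_pairwise.sublist (List.filter_sublist)
  -- nodup + same members → perm; both strictly sorted → equal
  have hperm : B.Perm A :=
    ((List.perm_ext_iff_of_nodup (hAsorted.imp (fun h => LT.lt.ne h))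
        (hBsorted.imp (fun h => LT.lt.ne h))).mpr hmem).symm
  have h1 : PySem.List.sorted A (fun x => x) false = A :=
    PySem.List.sorted_eq_self_of_pairwise A (fun x => x) (hAsorted.imp (fun h => le_of_lt h))
  have h2 : PySem.List.sorted A (fun x => x) false = B :=
    PySem.List.sorted_eq_of_perm_of_pairwise_lt A B (fun x => x) hperm hBsorted
  rw [← h1, h2]

-- ===== VERDICT (by name: the statement is the Claim_ definition above) =====
theorem agregar_pesos_spec : Claim_equal_agregar_pesos := by
  intro terminos _
  exact agregar_pesos_eq_alt terminos
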